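-- pv_equiv track=rewrite | github.com/jeaboswell/Reclaimerr | backend/api/routes/rules.py | _split_ancestors
-- ===== SOURCE A (Python) =====
-- def _split_ancestors(path: str) -> list[str]:
--     """Return all ancestor directory paths for ``path`` (including the path itself).
--
--     The returned list is ordered from the shallowest ancestor to the full path.
--     Handles both POSIX ("/media/movies/...") and Windows-style
--     ("C:/media/movies/...") absolute paths. Backslashes are normalized to
--     forward slashes so the tree can be built consistently.
--     """
--     if not path:
--         return []
--     norm = path.replace("\\", "/").rstrip("/")
--     if not norm:
--         return []
--     if norm.startswith("/"):
--         segments = [s for s in norm[1:].split("/") if s]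
--         parts: list[str] = []
--         current = ""
--         for seg in segments:
--             current = f"{current}/{seg}"
--             parts.append(current)
--         return parts
--     # non-absolute / windows-drive style
--     segments = [s for s in norm.split("/") if s]
--     if not segments:
--         return []
--     parts = [segments[0]]
--     for seg in segments[1:]:
--         parts.append(f"{parts[-1]}/{seg}")
--     return parts
-- ===== SOURCE B (Python) =====
-- def _split_ancestors(path: str) -> list[str]:
--     """Ancestor paths of ``path`` (shallowest first), computed by one
--     slice-and-join comprehension instead of two accumulator loops."""
--     norm = path.replace("\\", "/").rstrip("/")
--     segments = [s for s in norm.split("/") if s]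
--     if not segments:
--         return []
--     prefix = "/" if norm.startswith("/") else ""
--     return [prefix + "/".join(segments[:i]) for i in range(1, len(segments) + 1)]
-- ===== Notes on version B (the rewrite author's own statement) =====
-- stated objective: simpler
-- what changed: Replaces A's three-branch shape (empty-path/empty-norm early returns plus two separate accumulator loops, one extending a running string for absolute paths and one extending parts[-1] for relative ones) with a single pass: filter the split segments once, pick a '/' or '' prefix, and build every ancestor independently as prefix + '/'.join(segments[:i]).
import Mathlib
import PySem

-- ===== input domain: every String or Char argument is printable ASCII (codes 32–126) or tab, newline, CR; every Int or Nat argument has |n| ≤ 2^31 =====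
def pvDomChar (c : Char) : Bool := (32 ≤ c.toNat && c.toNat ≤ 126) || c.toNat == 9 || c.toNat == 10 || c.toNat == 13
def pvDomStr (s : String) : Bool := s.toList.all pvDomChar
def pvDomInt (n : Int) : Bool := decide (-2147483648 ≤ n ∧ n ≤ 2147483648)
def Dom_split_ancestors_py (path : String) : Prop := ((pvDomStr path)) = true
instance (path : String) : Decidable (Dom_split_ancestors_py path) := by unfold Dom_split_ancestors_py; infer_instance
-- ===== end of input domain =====

-- B replaces A's two accumulator loops (absolute vs relative) by one filter + prefix + slice-and-join comprehension; objective: simpler.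


-- shared shim for Python's str.rstrip("/") (no chars-argument rstrip in PySem); exact: drops exactly the trailing '/' characters
def pvRstripSlash (l : List Char) : List Char :=
  (l.reverse.dropWhile (fun c => c == '/')).reverse

-- ===== PORT A =====
-- A's loops: both extend the previous entry by "/" + seg while appending; pvChain carries that previous entry (current / parts[-1])
def pvChain (cur : List Char) (segs : List (List Char)) : List (List Char) :=
  match segs with
  | [] => []
  | s :: rest =>
    let c := cur ++ '/' :: s
    c :: pvChain c rest

def split_ancestors_py (path : String) : List String :=
  if path = "" then []
  else
    let norm := pvRstripSlash (PySem.Chars.replace path.toList ['\\'] ['/'])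
    if norm = [] then []
    else if PySem.Chars.startswith norm ['/'] then
      let segments := (PySem.Chars.splitOn (PySem.List.slice norm (some 1) none) ['/']).filter (fun s => s ≠ [])
      (pvChain [] segments).map String.ofList
    else
      let segments := (PySem.Chars.splitOn norm ['/']).filter (fun s => s ≠ [])
      match segments with
      | [] => []
      | s0 :: rest => (s0 :: pvChain s0 rest).map String.ofList

-- ===== PORT B =====
def split_ancestors_py_alt (path : String) : List String :=
  let norm := pvRstripSlash (PySem.Chars.replace path.toList ['\\'] ['/'])
  let segments := (PySem.Chars.splitOn norm ['/']).filter (fun s => s ≠ [])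
  if segments = [] then []
  else
    let pre : List Char := if PySem.Chars.startswith norm ['/'] then ['/'] else []
    (PySem.List.pyRange 1 ((segments.length : Int) + 1) 1).map
      (fun i => String.ofList (pre ++ PySem.Chars.join ['/'] (PySem.List.slice segments none (some i))))

-- ===== PRECONDITION & SPEC =====
def Spec_split_ancestors_py (path : String) (out : List String) : Prop := out = split_ancestors_py_alt path
instance (path : String) (out : List String) : Decidable (Spec_split_ancestors_py path out) := by unfold Spec_split_ancestors_py; infer_instance

-- ===== CLAIM (what is proved, stated in full; the proofs are below) =====
def Claim_equal_split_ancestors_py : Prop := ∀ (path : String), Dom_split_ancestors_py path → Spec_split_ancestors_py path (split_ancestors_py path)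

-- ===== LEMMAS AND PROOFS =====

-- structural characterization of Chars.splitOn with separator "/"
def pvSplitF : List Char → List Char → List (List Char)
  | [], cur => [cur.reverse]
  | c :: rest, cur => if c = '/' then cur.reverse :: pvSplitF rest [] else pvSplitF rest (c :: cur)

lemma pv_go_eq (fuel : Nat) (l cur : List Char) (acc : List (List Char)) (h : l.length < fuel) :
    PySem.Chars.splitOn.go ['/'] fuel l cur acc = acc.reverse ++ pvSplitF l cur := by
  induction fuel generalizing l cur acc with
  | zero => omega
  | succ n ih =>
    cases l with
    | nil =>
      rw [PySem.Chars.splitOn.go.eq_def]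
      simp [pvSplitF]
    | cons c rest =>
      rw [PySem.Chars.splitOn.go.eq_def]
      simp only [List.isPrefixOf, List.length_cons] at *
      by_cases hc : c = '/'
      · subst hc
        simp only [beq_self_eq_true, Bool.true_and, if_pos, List.drop_succ_cons, List.drop_zero,
          List.length_nil, Nat.zero_add]
        rw [ih _ _ _ (by omega)]
        simp [pvSplitF]
      · rw [if_neg (by simp [beq_iff_eq]; exact fun hh => hc hh.symm)]
        rw [ih _ _ _ (by omega)]
        simp [pvSplitF, hc]

lemma pv_splitOn_eq (l : List Char) : PySem.Chars.splitOn l ['/'] = pvSplitF l [] := by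
  rw [PySem.Chars.splitOn.eq_1, pv_go_eq _ _ _ _ (by omega)]
  simp

lemma pv_pyRange_eq (n : Nat) :
    PySem.List.pyRange 1 ((n : Int) + 1) 1 = (List.range n).map (fun k : Nat => (k : Int) + 1) := by
  simp only [PySem.List.pyRange]
  rw [if_neg (by norm_num), if_pos (by norm_num)]
  rcases Nat.eq_zero_or_pos n with h | h
  · subst h; simp
  · rw [if_pos (by omega)]
    have h1 : (((n : Int) + 1 - 1 + 1 - 1) / 1).toNat = n := by
      norm_num
    rw [h1]
    exact List.map_congr_left (fun k _ => by push_cast; ring)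

-- the shared core: A's chain equals B's take-and-join comprehension
lemma pv_chain_eq (segs : List (List Char)) (cur : List Char) :
    pvChain cur segs
      = (List.range segs.length).map (fun k => cur ++ '/' :: PySem.Chars.join ['/'] (segs.take (k + 1))) := by
  induction segs generalizing cur with
  | nil => simp [pvChain]
  | cons s rest ih =>
    simp only [pvChain, List.length_cons, List.range_succ_eq_map, List.map_cons, List.map_map]
    congr 1
    · simp [PySem.Chars.join_singleton]
    · rw [ih (cur ++ '/' :: s)]
      apply List.map_congr_left
      intro k hk
      simp only [Function.comp, Nat.succ_eq_add_one, List.take_succ_cons]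
      have hk' : k < rest.length := List.mem_range.mp hk
      have hne : rest.take (k + 1) ≠ [] := by
        rw [Ne, List.take_eq_nil_iff]
        rintro (h | h) <;> simp_all
      obtain ⟨t0, ts, ht⟩ := List.exists_cons_of_ne_nil hne
      rw [ht, PySem.Chars.join_cons_cons, ← ht]
      simp

lemma pv_splitF_slash (t : List Char) : pvSplitF ('/' :: t) [] = [] :: pvSplitF t [] := by
  simp [pvSplitF]

-- B's comprehension, rewritten over Nat indices
lemma pv_alt_map (segs : List (List Char)) (pre : List Char) :
    (PySem.List.pyRange 1 ((segs.length : Int) + 1) 1).map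
        (fun i => String.ofList (pre ++ PySem.Chars.join ['/'] (PySem.List.slice segs none (some i))))
      = (List.range segs.length).map
        (fun k => String.ofList (pre ++ PySem.Chars.join ['/'] (segs.take (k + 1)))) := by
  rw [pv_pyRange_eq, List.map_map]
  apply List.map_congr_left
  intro k _
  simp only [Function.comp]
  rw [show ((k : Int) + 1) = ((k + 1 : Nat) : Int) from by omega,
    PySem.List.slice_to_natCast]

-- ===== VERDICT (by name: the statement is the Claim_ definition above) =====
theorem split_ancestors_py_spec : Claim_equal_split_ancestors_py := by
  intro path _
  simp only [Spec_split_ancestors_py, split_ancestors_py, split_ancestors_py_alt]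
  by_cases hp : path = ""
  · subst hp; decide
  · rw [if_neg hp]
    set norm := pvRstripSlash (PySem.Chars.replace path.toList ['\\'] ['/']) with hnorm
    by_cases hn : norm = []
    · rw [if_pos hn, hn,
        show PySem.Chars.splitOn ([] : List Char) ['/'] = [[]] from by rw [pv_splitOn_eq]; rfl]
      simp
    · rw [if_neg hn]
      by_cases habs : PySem.Chars.startswith norm ['/'] = true
      · -- absolute path: norm = '/' :: t
        obtain ⟨c, t, hct⟩ := List.exists_cons_of_ne_nil hn
        have hc : c = '/' := by
          have h2 := habs
          rw [hct] at h2
          simp [PySem.Chars.startswith, List.isPrefixOf] at h2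
          exact h2.symm
        subst hc
        simp only [habs, if_true]
        have hdrop : PySem.List.slice norm (some 1) none = t := by
          rw [PySem.List.slice_from_one, hct]; rfl
        have hsplit : (PySem.Chars.splitOn norm ['/']).filter (fun s => s ≠ [])
            = (PySem.Chars.splitOn (PySem.List.slice norm (some 1) none) ['/']).filter (fun s => s ≠ []) := by
          rw [hdrop, hct, pv_splitOn_eq, pv_splitOn_eq, pv_splitF_slash]
          simp
        rw [hsplit]
        set segs := (PySem.Chars.splitOn (PySem.List.slice norm (some 1) none) ['/']).filter (fun s => s ≠ []) with hsegs
        by_cases hs : segs = []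
        · simp [hs, pvChain]
        · rw [if_neg hs, pv_alt_map, pv_chain_eq]
          simp [List.map_map, Function.comp]
      · -- relative path
        have habs' : PySem.Chars.startswith norm ['/'] = false := by simpa using habs
        rw [if_neg habs]
        simp only [habs', Bool.false_eq_true, if_false]
        set segs := (PySem.Chars.splitOn norm ['/']).filter (fun s => s ≠ []) with hsegs
        cases hsc : segs with
        | nil => simp
        | cons s0 rest =>
          rw [if_neg (by simp : ¬(s0 :: rest) = ([] : List (List Char))), pv_alt_map]
          show List.map String.ofList (s0 :: pvChain s0 rest) = _
          simp only [List.length_cons, List.range_succ_eq_map, List.map_cons, List.map_map]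
          congr 1
          · simp [PySem.Chars.join_singleton]
          · rw [pv_chain_eq, List.map_map]
            apply List.map_congr_left
            intro k hk
            simp only [Function.comp, Nat.succ_eq_add_one, List.take_succ_cons]
            have hne : rest.take (k + 1) ≠ [] := by
              rw [Ne, List.take_eq_nil_iff]
              have := List.mem_range.mp hk
              rintro (h | h) <;> simp_all
            obtain ⟨t0, ts, ht⟩ := List.exists_cons_of_ne_nil hne
            rw [ht, PySem.Chars.join_cons_cons, ← ht]
            simp
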